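-- pv_equiv track=rewrite | github.com/jpigles/alphafold-rmsd | project_pipeline/scripts/prune_pdb_ids.py | prune_extra_chains
-- ===== SOURCE A (Python) =====
-- def prune_extra_chains(pdb_ids_str):
--
--     #Turn the string into a list
--     pdb_ids_w_chain = pdb_ids_str.strip().split(sep=' ')
--
--     #Empty dictionary to fill.
--     pdb_ids_dict = {}
--
--     for pdb_id in pdb_ids_w_chain:
--
--         #PDB ID (lowercase)
--         pdb = pdb_id[:4].lower()
--
--         #Chain label
--         chain = pdb_id[5]
--
--         #Add the PDB ID as a key and the chain label as a value.
--         if pdb not in pdb_ids_dict.keys():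
--             pdb_ids_dict[pdb] = [chain]
--         else:
--             pdb_ids_dict[pdb].append(chain)
--
--     #Extract each PDB from the pdb_ids dict
--     for pdb_id in pdb_ids_dict.copy():
--
--         #Determine whether there are one or more chains. If there are more than one chain, pop it out.
--         if len(pdb_ids_dict[pdb_id]) != 1:
--
--             #Remove the PDB ID from the pdb_ids_dict
--             remove_pdb = pdb_ids_dict.pop(pdb_id)
--
--     # Now we convert them back to strings and add it all together.
--     # Make a list of the values
--     values_list = list(pdb_ids_dict.values())
--
--     #Make a list of the keys
--     key_list = list(pdb_ids_dict.keys())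
--
--     #Empty string to fill with my IDs.
--     unique_pdb_ids = ''
--
--     for n in range(len(pdb_ids_dict)):
--
--         #Get the value
--         chain = values_list[n][0]
--
--         #Get the key
--         key = key_list[n].lower()
--
--         # Put them together
--         pdb_id_chain_str = key + '.' + chain
--
--          #Append to my unique_pdb_ids string
--         unique_pdb_ids = unique_pdb_ids + ' ' + pdb_id_chain_str
--
--     #Make the value of PDB at the index i equal to our new string.
--     return unique_pdb_ids
-- ===== SOURCE B (Python) =====
-- def prune_extra_chains(pdb_ids_str):
--     # Count-then-filter: one counting pass over codes, then one emitting pass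
--     # over the original tokens (no dict of chain lists, no pop pass, no
--     # parallel keys/values index rebuild).
--     tokens = pdb_ids_str.strip().split(sep=' ')
--
--     counts = {}
--     for t in tokens:
--         code = t[:4].lower()
--         counts[code] = counts.get(code, 0) + 1
--
--     out = ''
--     for t in tokens:
--         code = t[:4].lower()
--         if counts[code] == 1:
--             out = out + ' ' + code + '.' + t[5]
--     return out
-- ===== Notes on version B (the rewrite author's own statement) =====
-- stated objective: simpler
-- what changed: Replaces A's three phases (group chains into a dict of lists, pop multi-chain entries from a dict copy, rebuild the string by parallel indexing into the keys and values lists) with two plain passes: count each 4-char lowercased code, then emit the key, a dot and the chain letter for every token whose code occurs exactly once.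
import Mathlib
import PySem

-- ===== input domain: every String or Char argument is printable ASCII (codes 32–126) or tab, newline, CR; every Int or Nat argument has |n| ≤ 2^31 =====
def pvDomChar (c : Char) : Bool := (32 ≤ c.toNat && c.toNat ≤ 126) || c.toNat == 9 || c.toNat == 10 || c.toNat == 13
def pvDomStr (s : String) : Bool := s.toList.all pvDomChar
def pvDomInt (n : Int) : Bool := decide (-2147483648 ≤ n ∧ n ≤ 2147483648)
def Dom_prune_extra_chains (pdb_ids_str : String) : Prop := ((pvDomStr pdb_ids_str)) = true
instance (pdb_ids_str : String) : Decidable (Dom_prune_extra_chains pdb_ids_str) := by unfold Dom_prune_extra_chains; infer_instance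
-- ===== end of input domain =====

-- B replaces A's group-into-dict / pop-multichain / parallel-index rebuild with a
-- count-then-filter pair of passes over the tokens (same return value; objective: simpler).


-- ===== PORT A =====
def prune_extra_chains (pdb_ids_str : String) : String :=
  -- pdb_ids_str.strip().split(sep=' ')
  let pdb_ids_w_chain : List String := (PySem.Str.split? (PySem.Str.strip pdb_ids_str) " ").getD []
  -- first loop: group chains by lowercased 4-char code
  let d : PySem.Dict String (List Char) :=
    pdb_ids_w_chain.foldl (fun d pdb_id =>
      let pdb := PySem.Str.lower (PySem.Str.slice pdb_id none (some 4))
      let chain := (PySem.Str.pyGet? pdb_id 5).getD ' '   -- pdb_id[5]; IndexError excluded by Pre_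
      if d.contains pdb = false then d.insert pdb [chain]
      else d.modify pdb [] (fun l => l ++ [chain])) PySem.Dict.empty
  -- second loop: pop every code with more than one chain
  let d2 : PySem.Dict String (List Char) :=
    d.keys.foldl (fun d' pdb_id =>
      if (d'.getD pdb_id []).length ≠ 1 then d'.erase pdb_id else d') d
  let values_list := d2.values
  let key_list := d2.keys
  -- third loop: rebuild the string by parallel indexing
  (PySem.List.pyRange 0 (d2.size : Int) 1).foldl (fun unique_pdb_ids n =>
    let chain := PySem.List.pyGetD (PySem.List.pyGetD values_list n []) 0 ' '
    let key := PySem.Str.lower (PySem.List.pyGetD key_list n "")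
    let pdb_id_chain_str := key ++ "." ++ String.ofList [chain]
    unique_pdb_ids ++ " " ++ pdb_id_chain_str) ""

-- ===== PORT B =====
def prune_extra_chains_alt (pdb_ids_str : String) : String :=
  let tokens : List String := (PySem.Str.split? (PySem.Str.strip pdb_ids_str) " ").getD []
  -- pass 1: count occurrences of each code
  let counts : PySem.Dict String Int :=
    tokens.foldl (fun d t =>
      let code := PySem.Str.lower (PySem.Str.slice t none (some 4))
      d.insert code (d.getD code 0 + 1)) PySem.Dict.empty
  -- pass 2: emit tokens whose code is unique
  tokens.foldl (fun out t =>
    let code := PySem.Str.lower (PySem.Str.slice t none (some 4))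
    if counts.getD code 0 == 1 then
      out ++ " " ++ code ++ "." ++ String.ofList [(PySem.Str.pyGet? t 5).getD ' ']
    else out) ""

-- ===== PRECONDITION & SPEC =====
-- Pre_ excludes exactly the inputs where the Python A raises IndexError: some space-separated
-- token has fewer than 6 characters, so pdb_id[5] fails. (The two PORTS agree on every input;
-- the equivalence proof below does not need the hypothesis, only the Python raises there.)
def Pre_prune_extra_chains (pdb_ids_str : String) : Prop :=
  ∀ t ∈ (PySem.Str.split? (PySem.Str.strip pdb_ids_str) " ").getD [], 6 ≤ t.toList.length
instance (pdb_ids_str : String) : Decidable (Pre_prune_extra_chains pdb_ids_str) := by unfold Pre_prune_extra_chains; infer_instance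
def pvWitness_prune_extra_chains : String := "1abc.A 2xyz.B 2xyz.C"
def Spec_prune_extra_chains (pdb_ids_str : String) (out : String) : Prop := out = prune_extra_chains_alt pdb_ids_str
instance (pdb_ids_str : String) (out : String) : Decidable (Spec_prune_extra_chains pdb_ids_str out) := by unfold Spec_prune_extra_chains; infer_instance

-- ===== CLAIM (what is proved, stated in full; the proofs are below) =====
def Claim_equal_prune_extra_chains : Prop := ∀ (pdb_ids_str : String), Dom_prune_extra_chains pdb_ids_str → Pre_prune_extra_chains pdb_ids_str → Spec_prune_extra_chains pdb_ids_str (prune_extra_chains pdb_ids_str)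

-- ===== LEMMAS AND PROOFS =====

-- abbreviations used only by the proofs
def pvKey (t : String) : String := PySem.Str.lower (PySem.Str.slice t none (some 4))
def pvCh (t : String) : Char := (PySem.Str.pyGet? t 5).getD ' '

theorem pv_lowerChar_idem (c : Char) :
    PySem.Chars.lowerChar (PySem.Chars.lowerChar c) = PySem.Chars.lowerChar c := by
  simp only [PySem.Chars.lowerChar, PySem.Chars.isupper]
  split_ifs with h1 h2 <;> try rfl
  exfalso
  simp only [Bool.and_eq_true, decide_eq_true_eq, Char.le_def] at h1 h2
  have hA : ('A' : Char).val = 65 := rfl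
  have hZ : ('Z' : Char).val = 90 := rfl
  rw [hA, hZ] at h1
  have hlo : 65 ≤ c.val.toNat := UInt32.le_iff_toNat_le.mp h1.1
  have hhi : c.val.toNat ≤ 90 := UInt32.le_iff_toNat_le.mp h1.2
  have hvalid : (c.toNat + 32).isValidChar := by
    left
    show c.val.toNat + 32 < 55296
    omega
  have htn : (Char.ofNat (c.toNat + 32)).toNat = c.toNat + 32 := by
    rw [Char.toNat_ofNat, if_pos hvalid]
  rw [hA, hZ] at h2
  have h2lo := UInt32.le_iff_toNat_le.mp h2.1
  have h2hi := UInt32.le_iff_toNat_le.mp h2.2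
  have hb : (Char.ofNat (c.toNat + 32)).val.toNat = c.val.toNat + 32 := htn
  have e1 : (65 : UInt32).toNat = 65 := rfl
  have e2 : (90 : UInt32).toNat = 90 := rfl
  rw [e1] at h2lo
  rw [e2] at h2hi
  omega

theorem pv_lower_idem (x : String) :
    PySem.Str.lower (PySem.Str.lower x) = PySem.Str.lower x := by
  apply String.toList_inj.mp
  simp only [PySem.Str.toList_lower, PySem.Chars.lower, List.map_map]
  exact List.map_congr_left (fun c _ => pv_lowerChar_idem c)

theorem pv_key_lower (t : String) : PySem.Str.lower (pvKey t) = pvKey t :=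
  pv_lower_idem _

-- 'if p(x): acc := f(acc, x)' over a list is a fold over the filtered list
theorem pv_foldl_if {α β : Type} (p : α → Bool) (f : β → α → β) (l : List α) (a : β) :
    l.foldl (fun acc x => if p x then f acc x else acc) a = (l.filter p).foldl f a := by
  induction l generalizing a with
  | nil => rfl
  | cons x xs ih =>
    by_cases h : p x = true
    · simp [h, ih]
    · simp only [Bool.not_eq_true] at h
      simp [h, ih]

theorem pv_filter_discard {α : Type} [BEq α] [LawfulBEq α] (p : α → Bool) (s : List α) (x : α) :
    (PySem.Set.discard s x).filter p =
      if p x then PySem.Set.discard (s.filter p) x else s.filter p := by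
  simp only [PySem.Set.discard, List.filter_filter]
  by_cases hp : p x = true
  · rw [if_pos hp]
    apply List.filter_congr
    intro y _
    by_cases hy : y = x <;> simp [hy, Bool.and_comm]
  · simp only [Bool.not_eq_true] at hp
    rw [if_neg (by simp [hp])]
    apply List.filter_congr
    intro y _
    by_cases hy : y = x <;> simp [hy, hp]

theorem pv_filter_ofList {α : Type} [BEq α] [LawfulBEq α] (p : α → Bool) (xs : List α) :
    (PySem.Set.ofList xs).filter p = PySem.Set.ofList (xs.filter p) := by
  induction xs with
  | nil => rfl
  | cons x xs ih =>
    rw [PySem.Set.ofList_cons, List.filter_cons]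
    by_cases hp : p x = true
    · simp only [hp, if_pos]
      rw [List.filter_cons_of_pos hp, PySem.Set.ofList_cons, ← ih, pv_filter_discard, if_pos hp]
    · simp only [Bool.not_eq_true] at hp
      rw [List.filter_cons_of_neg (by simp [hp]), ← ih, pv_filter_discard]
      simp [hp]

theorem pv_items_erase {κ ν : Type} [BEq κ] (d : PySem.Dict κ ν) (k : κ) :
    (d.erase k).items = d.items.filter (fun p => !(p.1 == k)) := rfl

theorem pv_nodup_keys_erase {κ ν : Type} [BEq κ] (d : PySem.Dict κ ν) (k : κ)
    (h : d.keys.Nodup) : (d.erase k).keys.Nodup := by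
  have hsub : (d.erase k).keys.Sublist d.keys := by
    simp only [PySem.Dict.keys, pv_items_erase]
    exact List.Sublist.map _ List.filter_sublist
  exact h.sublist hsub

-- the pop loop: folding 'if len(d[k]) != 1: pop k' over distinct keys filters the items
theorem pv_eraseLoop {ν : Type} (ks : List String) (d : PySem.Dict String (List ν))
    (hnd : d.keys.Nodup) :
    (ks.foldl (fun d' k => if (d'.getD k []).length ≠ 1 then d'.erase k else d') d).items
      = d.items.filter (fun p => !(decide (p.1 ∈ ks)) || p.2.length == 1) := by
  induction ks generalizing d with
  | nil => simp
  | cons k ks ih =>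
    simp only [List.foldl_cons]
    by_cases hl : (d.getD k []).length ≠ 1
    · rw [if_pos hl, ih _ (pv_nodup_keys_erase d k hnd)]
      rw [pv_items_erase, List.filter_filter]
      apply List.filter_congr
      intro p hp
      by_cases hpk : p.1 = k
      · have hv : d.getD p.1 [] = p.2 := by
          rcases p with ⟨k1, v1⟩
          exact PySem.Dict.getD_of_mem_items d hp hnd []
        rw [hpk] at hv
        have : p.2.length ≠ 1 := by rw [← hv]; exact hl
        simp [hpk, this]
      · simp [hpk]
    · rw [if_neg hl, ih _ hnd]
      apply List.filter_congr
      intro p hp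
      by_cases hpk : p.1 = k
      · have hv : d.getD p.1 [] = p.2 := by
          rcases p with ⟨k1, v1⟩
          exact PySem.Dict.getD_of_mem_items d hp hnd []
        rw [hpk] at hv
        have : p.2.length = 1 := by rw [← hv]; omega
        simp [hpk, this]
      · simp [hpk]

-- a Nat-count compared with 1 through the Int cast
theorem pv_count_beq (n : Nat) : ((n : Int) == 1) = (n == 1) := by
  by_cases h : n = 1 <;> simp [h]


-- the third loop of A: parallel indexing over keys/values of a dict is a fold over its items
theorem pv_range_fold (d : PySem.Dict String (List Char)) :
    (PySem.List.pyRange 0 (d.size : Int) 1).foldl (fun acc n =>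
        acc ++ " " ++ (PySem.Str.lower (PySem.List.pyGetD d.keys n "") ++ "." ++
          String.ofList [PySem.List.pyGetD (PySem.List.pyGetD d.values n []) 0 ' '])) ""
      = d.items.foldl (fun acc p =>
          acc ++ " " ++ (PySem.Str.lower p.1 ++ "." ++
            String.ofList [PySem.List.pyGetD p.2 0 ' '])) "" := by
  simp only [PySem.Dict.keys, PySem.Dict.values, PySem.Dict.size]
  have hcong : ∀ (acc : String), ∀ n ∈ PySem.List.pyRange 0 (d.items.length : Int) 1,
      acc ++ " " ++ (PySem.Str.lower (PySem.List.pyGetD (d.items.map (fun x => x.1)) n "") ++ "." ++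
        String.ofList [PySem.List.pyGetD (PySem.List.pyGetD (d.items.map (fun x => x.2)) n []) 0 ' '])
      = acc ++ " " ++ (PySem.Str.lower (PySem.List.pyGetD d.items n ("", [])).1 ++ "." ++
        String.ofList [PySem.List.pyGetD (PySem.List.pyGetD d.items n ("", [])).2 0 ' ']) := by
    intro acc n _
    rw [PySem.List.pyGetD_map (fun x => x.1) d.items n ("", []),
        PySem.List.pyGetD_map (fun x => x.2) d.items n ("", [])]
  rw [PySem.List.foldl_congr_mem _ _ _ _ hcong]
  exact PySem.List.foldl_pyRange_zero_pyGetD' d.items ("", [])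
    (fun acc p => acc ++ " " ++ (PySem.Str.lower p.1 ++ "." ++
      String.ofList [PySem.List.pyGetD p.2 0 ' '])) ""

theorem pv_main (s : String) : prune_extra_chains s = prune_extra_chains_alt s := by
  simp only [prune_extra_chains, prune_extra_chains_alt]
  generalize (PySem.Str.split? (PySem.Str.strip s) " ").getD [] = toks
  -- notation
  have hbodyA : (fun (d : PySem.Dict String (List Char)) (pdb_id : String) =>
      if d.contains (PySem.Str.lower (PySem.Str.slice pdb_id none (some 4))) = false
      then d.insert (PySem.Str.lower (PySem.Str.slice pdb_id none (some 4)))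
             [(PySem.Str.pyGet? pdb_id 5).getD ' ']
      else d.modify (PySem.Str.lower (PySem.Str.slice pdb_id none (some 4))) []
             (fun l => l ++ [(PySem.Str.pyGet? pdb_id 5).getD ' ']))
      = fun d t => d.modify (pvKey t) [] (fun l => l ++ [pvCh t]) := by
    funext d t
    by_cases h : d.contains (PySem.Str.lower (PySem.Str.slice t none (some 4))) = false
    · rw [if_pos h]
      simp only [PySem.Dict.modify, pvKey, pvCh,
        PySem.Dict.getD_of_not_contains d _ h, List.nil_append]
    · rw [if_neg h]
      rfl
  rw [hbodyA, pv_range_fold]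
  set D := List.foldl (fun d t => d.modify (pvKey t) [] fun l => l ++ [pvCh t]) PySem.Dict.empty toks with hD
  have hpair : D = (toks.map (fun t => (pvKey t, pvCh t))).foldl
      (fun d p => d.modify p.1 [] (fun x => x ++ [p.2])) PySem.Dict.empty := by
    rw [hD, List.foldl_map]
  have hnodD : D.keys.Nodup := by
    rw [hpair]
    exact PySem.Dict.nodup_keys_foldl_modify_key _ (fun p : String × Char => p.1) []
      (fun (d : PySem.Dict String (List Char)) (p : String × Char) => fun x => x ++ [p.2]) _ (by simp)
  have hkeysD : D.keys = PySem.Set.ofList (toks.map pvKey) := by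
    rw [hpair, PySem.Dict.keys_foldl_modify_key _ (fun p : String × Char => p.1) []
      (fun (d : PySem.Dict String (List Char)) (p : String × Char) => fun x => x ++ [p.2])]
    simp only [PySem.Dict.keys_empty, PySem.Set.update_nil_left, List.map_map]
    rfl
  have hgetD : ∀ c, D.getD c [] =
      ((toks.map (fun t => (pvKey t, pvCh t))).filter (fun p => p.1 == c)).map (fun p => p.2) := by
    intro c
    rw [hpair, PySem.Dict.getD_foldl_modify_append]
    simp [PySem.Dict.getD_empty]
  have hlenD : ∀ c, (D.getD c []).length = (toks.map pvKey).count c := by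
    intro c
    rw [hgetD c, List.length_map, ← List.countP_eq_length_filter]
    rw [List.countP_map, List.count, List.countP_map]
    rfl
  have hd2 : (D.keys.foldl (fun d' k => if (d'.getD k []).length ≠ 1 then d'.erase k else d') D).items
      = D.items.filter (fun p => p.2.length == 1) := by
    rw [pv_eraseLoop _ _ hnodD]
    apply List.filter_congr
    intro p hp
    have hm : p.1 ∈ D.keys := PySem.Dict.mem_keys_of_mem_items D hp
    simp [hm]
  rw [hd2]
  have hitems : D.items = (PySem.Set.ofList (toks.map pvKey)).map (fun c => (c, D.getD c [])) := by
    rw [← hkeysD]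
    exact PySem.Dict.items_eq_map_keys D hnodD []
  rw [hitems, List.filter_map, List.foldl_map]
  have hpred : ((fun p : String × List Char => p.2.length == 1) ∘ (fun c => (c, D.getD c [])))
      = fun c => (toks.map pvKey).count c == 1 := by
    funext c
    simp only [Function.comp_apply]
    rw [hlenD c]
  rw [hpred, pv_filter_ofList]
  have hnodupF : ((toks.map pvKey).filter (fun c => (toks.map pvKey).count c == 1)).Nodup := by
    rw [List.nodup_iff_count_le_one]
    intro a
    by_cases h : (toks.map pvKey).count a = 1
    · rw [List.count_filter (by simp [h])]
      omega
    · have hnm : a ∉ (toks.map pvKey).filter (fun c => (toks.map pvKey).count c == 1) := by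
        intro ha
        exact h (by simpa using (List.mem_filter.mp ha).2)
      rw [List.count_eq_zero.mpr hnm]
      omega
  rw [PySem.Set.ofList_eq_self_of_nodup _ hnodupF, List.filter_map, List.foldl_map]
  -- B side: the counting dict computes the multiplicity of each code
  have hfoldC : ((toks.foldl (fun d t =>
        d.insert (PySem.Str.lower (PySem.Str.slice t none (some 4)))
          (d.getD (PySem.Str.lower (PySem.Str.slice t none (some 4))) 0 + 1)) PySem.Dict.empty)
        : PySem.Dict String Int)
      = (toks.map pvKey).foldl (fun d x => d.insert x (d.getD x 0 + 1)) PySem.Dict.empty := by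
    rw [List.foldl_map]
    rfl
  have hcountsB : ∀ c, ((toks.foldl (fun d t =>
        d.insert (PySem.Str.lower (PySem.Str.slice t none (some 4)))
          (d.getD (PySem.Str.lower (PySem.Str.slice t none (some 4))) 0 + 1)) PySem.Dict.empty)).getD c 0
      = (((toks.map pvKey).count c : Nat) : Int) := by
    intro c
    rw [hfoldC, PySem.Dict.getD_foldl_insert_add_one]
    simp
  conv_rhs => rw [PySem.List.foldl_congr_mem _ _
      (fun out t => if ((toks.map pvKey).count (pvKey t) == 1) = true
        then out ++ " " ++ pvKey t ++ "." ++ String.ofList [pvCh t] else out) _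
      (by intro acc t _
          rw [hcountsB (PySem.Str.lower (PySem.Str.slice t none (some 4))), pv_count_beq]
          rfl)]
  rw [pv_foldl_if]
  rw [show ((fun c => ((toks.map pvKey).count c == 1)) ∘ pvKey)
      = (fun t => ((toks.map pvKey).count (pvKey t) == 1)) from rfl]
  apply PySem.List.foldl_congr_mem
  intro acc t ht
  obtain ⟨htoks, hcnt⟩ := List.mem_filter.mp ht
  have hcnt1 : (toks.map pvKey).count (pvKey t) = 1 := by simpa using hcnt
  have hsingle : D.getD (pvKey t) [] = [pvCh t] := by
    have hlen1 : (D.getD (pvKey t) []).length = 1 := by rw [hlenD]; exact hcnt1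
    have hmem : pvCh t ∈ D.getD (pvKey t) [] := by
      rw [hgetD]
      exact List.mem_map.mpr ⟨(pvKey t, pvCh t),
        List.mem_filter.mpr ⟨List.mem_map.mpr ⟨t, htoks, rfl⟩, by simp⟩, rfl⟩
    obtain ⟨a, ha⟩ := List.length_eq_one_iff.mp hlen1
    rw [ha] at hmem ⊢
    rw [List.mem_singleton.mp hmem]
  show acc ++ " " ++ (PySem.Str.lower (pvKey t) ++ "." ++
      String.ofList [PySem.List.pyGetD (D.getD (pvKey t) []) 0 ' '])
    = acc ++ " " ++ pvKey t ++ "." ++ String.ofList [pvCh t]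
  rw [pv_key_lower, hsingle, PySem.List.pyGetD_zero_cons]
  simp [String.append_assoc]

-- ===== VERDICT (by name: the statement is the Claim_ definition above) =====
theorem prune_extra_chains_spec : Claim_equal_prune_extra_chains := by
  intro s _ _
  unfold Spec_prune_extra_chains
  exact pv_main s
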